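-- pv_equiv track=rewrite | github.com/xiangli-sophgo/CrossRing | config/d2d_config.py | _get_edge_nodes
-- ===== SOURCE A (Python) =====
-- def _get_edge_nodes(edge, num_row, num_col, interface_type=None):
--     """
--     获取指定边的所有节点
--
--     Args:
--         edge: 边界方向 ("top", "bottom", "left", "right")
--         num_row: 逻辑行数
--         num_col: 列数
--         interface_type: 接口类型 ("rn" 或 "sn")，用于区分奇偶行
--     """
--     if edge == "top":
--         # 第一行（row=0）和第二行（row=1）
--         if interface_type == "rn":
--             # RN在奇数行（第1行）
--             return list(range(num_col, 2 * num_col))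
--         elif interface_type == "sn":
--             # SN在偶数行（第0行）
--             return list(range(0, num_col))
--         else:
--             # 默认返回第0行（向后兼容）
--             return list(range(0, num_col))
--     elif edge == "bottom":
--         # 最后两行
--         if interface_type == "rn":
--             # RN在奇数行（最后一行）
--             return list(range((num_row - 1) * num_col, num_row * num_col))
--         elif interface_type == "sn":
--             # SN在偶数行（倒数第二行）
--             return list(range((num_row - 2) * num_col, (num_row - 1) * num_col))
--         else:
--             # 默认返回最后一行（向后兼容）
--             return list(range((num_row - 1) * num_col, num_row * num_col))
--     elif edge == "left":
--         # 所有行的左边（col=0）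
--         if interface_type == "rn":
--             # RN在奇数行
--             return [row * num_col for row in range(1, num_row, 2)]
--         elif interface_type == "sn":
--             # SN在偶数行
--             return [row * num_col for row in range(0, num_row, 2)]
--         else:
--             # 默认返回所有行
--             return [row * num_col for row in range(num_row)]
--     elif edge == "right":
--         # 所有行的右边（col=num_col-1）
--         if interface_type == "rn":
--             # RN在奇数行
--             return [row * num_col + (num_col - 1) for row in range(1, num_row, 2)]
--         elif interface_type == "sn":
--             # SN在偶数行
--             return [row * num_col + (num_col - 1) for row in range(0, num_row, 2)]
--         else:
--             # 默认返回所有行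
--             return [row * num_col + (num_col - 1) for row in range(num_row)]
--     else:
--         return []
-- ===== SOURCE B (Python) =====
-- def _get_edge_nodes(edge, num_row, num_col, interface_type=None):
--     # Pick a row set and a column set, then build the result once
--     # as the row-major cross product r*num_col + c.
--     if edge in ("top", "bottom"):
--         if edge == "top":
--             rows = [1] if interface_type == "rn" else [0]
--         else:
--             rows = [num_row - 2] if interface_type == "sn" else [num_row - 1]
--         cols = list(range(num_col))
--     elif edge in ("left", "right"):
--         if interface_type == "rn":
--             rows = list(range(1, num_row, 2))
--         elif interface_type == "sn":
--             rows = list(range(0, num_row, 2))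
--         else:
--             rows = list(range(num_row))
--         cols = [0] if edge == "left" else [num_col - 1]
--     else:
--         return []
--     return [r * num_col + c for r in rows for c in cols]
-- ===== Notes on version B (the rewrite author's own statement) =====
-- stated objective: simpler
-- what changed: Each case now only selects a row set and a column set; the result is built once as the row-major cross product r*num_col + c, instead of eight hand-written range/comprehension bodies.
import Mathlib
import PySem

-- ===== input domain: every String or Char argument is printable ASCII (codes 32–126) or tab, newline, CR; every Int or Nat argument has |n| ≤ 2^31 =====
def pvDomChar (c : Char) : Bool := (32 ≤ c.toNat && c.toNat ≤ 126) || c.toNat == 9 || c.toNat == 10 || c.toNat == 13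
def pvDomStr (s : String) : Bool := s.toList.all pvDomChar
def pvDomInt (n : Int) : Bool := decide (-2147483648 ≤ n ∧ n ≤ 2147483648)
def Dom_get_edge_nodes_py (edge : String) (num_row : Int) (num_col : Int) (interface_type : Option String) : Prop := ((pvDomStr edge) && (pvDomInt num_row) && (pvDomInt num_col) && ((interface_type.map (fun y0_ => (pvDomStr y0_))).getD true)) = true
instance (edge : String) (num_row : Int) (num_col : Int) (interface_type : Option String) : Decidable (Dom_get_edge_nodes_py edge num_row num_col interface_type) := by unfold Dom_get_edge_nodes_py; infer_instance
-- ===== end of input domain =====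

-- B selects a row set and a column set per case and builds the result once as the
-- row-major cross product r*num_col + c (simpler decomposition, same cost).

-- ===== PORT A =====
def get_edge_nodes_py (edge : String) (num_row : Int) (num_col : Int) (interface_type : Option String) : List Int :=
  if edge = "top" then
    if interface_type = some "rn" then
      PySem.List.pyRange num_col (2 * num_col) 1
    else if interface_type = some "sn" then
      PySem.List.pyRange 0 num_col 1
    else
      PySem.List.pyRange 0 num_col 1
  else if edge = "bottom" then
    if interface_type = some "rn" then
      PySem.List.pyRange ((num_row - 1) * num_col) (num_row * num_col) 1
    else if interface_type = some "sn" then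
      PySem.List.pyRange ((num_row - 2) * num_col) ((num_row - 1) * num_col) 1
    else
      PySem.List.pyRange ((num_row - 1) * num_col) (num_row * num_col) 1
  else if edge = "left" then
    if interface_type = some "rn" then
      (PySem.List.pyRange 1 num_row 2).map (fun row => row * num_col)
    else if interface_type = some "sn" then
      (PySem.List.pyRange 0 num_row 2).map (fun row => row * num_col)
    else
      (PySem.List.pyRange 0 num_row 1).map (fun row => row * num_col)
  else if edge = "right" then
    if interface_type = some "rn" then
      (PySem.List.pyRange 1 num_row 2).map (fun row => row * num_col + (num_col - 1))
    else if interface_type = some "sn" then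
      (PySem.List.pyRange 0 num_row 2).map (fun row => row * num_col + (num_col - 1))
    else
      (PySem.List.pyRange 0 num_row 1).map (fun row => row * num_col + (num_col - 1))
  else []

-- ===== PORT B =====
def get_edge_nodes_py_alt (edge : String) (num_row : Int) (num_col : Int) (interface_type : Option String) : List Int :=
  if edge = "top" ∨ edge = "bottom" then
    let rows : List Int :=
      if edge = "top" then
        if interface_type = some "rn" then [1] else [0]
      else
        if interface_type = some "sn" then [num_row - 2] else [num_row - 1]
    let cols : List Int := PySem.List.pyRange 0 num_col 1
    rows.flatMap (fun r => cols.map (fun c => r * num_col + c))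
  else if edge = "left" ∨ edge = "right" then
    let rows : List Int :=
      if interface_type = some "rn" then PySem.List.pyRange 1 num_row 2
      else if interface_type = some "sn" then PySem.List.pyRange 0 num_row 2
      else PySem.List.pyRange 0 num_row 1
    let cols : List Int := if edge = "left" then [0] else [num_col - 1]
    rows.flatMap (fun r => cols.map (fun c => r * num_col + c))
  else []

-- ===== PRECONDITION & SPEC =====
def Spec_get_edge_nodes_py (edge : String) (num_row : Int) (num_col : Int) (interface_type : Option String) (out : List Int) : Prop := out = get_edge_nodes_py_alt edge num_row num_col interface_type
instance (edge : String) (num_row : Int) (num_col : Int) (interface_type : Option String) (out : List Int) : Decidable (Spec_get_edge_nodes_py edge num_row num_col interface_type out) := by unfold Spec_get_edge_nodes_py; infer_instance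

-- ===== CLAIM (what is proved, stated in full; the proofs are below) =====
def Claim_equal_get_edge_nodes_py : Prop := ∀ (edge : String) (num_row : Int) (num_col : Int) (interface_type : Option String), Dom_get_edge_nodes_py edge num_row num_col interface_type → Spec_get_edge_nodes_py edge num_row num_col interface_type (get_edge_nodes_py edge num_row num_col interface_type)

-- ===== LEMMAS AND PROOFS =====

-- range(a, a+n) is range(n) shifted by a
theorem pyRange_shift (a n : Int) :
    PySem.List.pyRange a (a + n) 1 = (PySem.List.pyRange 0 n 1).map (fun c => a + c) := by
  simp [PySem.List.pyRange_one, List.map_map, Function.comp]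

-- a singleton column set yields a plain map over the rows
theorem flatMap_singleton_eq_map (f : Int → Int) (l : List Int) :
    l.flatMap (fun r => [f r]) = l.map f := by
  induction l with
  | nil => simp
  | cons x xs ih => simp [List.flatMap_cons, ih]

-- ===== VERDICT (by name: the statement is the Claim_ definition above) =====
theorem get_edge_nodes_py_spec : Claim_equal_get_edge_nodes_py := by
  intro edge num_row num_col interface_type _
  unfold Spec_get_edge_nodes_py get_edge_nodes_py get_edge_nodes_py_alt
  by_cases ht : edge = "top" <;> by_cases hb : edge = "bottom" <;>
    by_cases hl : edge = "left" <;> by_cases hr : edge = "right" <;>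
    simp [ht, hb, hl, hr] at * <;>
    by_cases h1 : interface_type = some "rn" <;> by_cases h2 : interface_type = some "sn" <;>
    simp [h1, h2, flatMap_singleton_eq_map]
  · rw [two_mul]; exact pyRange_shift num_col num_col
  · rw [two_mul]; exact pyRange_shift num_col num_col
  · rw [show num_row * num_col = (num_row - 1) * num_col + num_col by ring]
    exact pyRange_shift _ _
  · rw [show num_row * num_col = (num_row - 1) * num_col + num_col by ring]
    exact pyRange_shift _ _
  · rw [show (num_row - 1) * num_col = (num_row - 2) * num_col + num_col by ring]
    exact pyRange_shift _ _
  · rw [show num_row * num_col = (num_row - 1) * num_col + num_col by ring]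
    exact pyRange_shift _ _
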